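-- pv_equiv track=rewrite | github.com/louisswarren/pythonconstrictor | examples/primes.py | grange
-- ===== SOURCE A (Python) =====
-- def grange(g, start, stop, step = 1):
--     num_iterations = 0
--     for value in g:
--         if stop <= value:
--             break
--         if value < start:
--             continue
--         if num_iterations % step == 0:
--             yield value
--         num_iterations += 1
-- ===== SOURCE B (Python) =====
-- def grange(g, start, stop, step=1):
--     # Stage 1: materialise the prefix of g below stop, keeping values >= start.
--     kept = []
--     for v in g:
--         if v >= stop:
--             break
--         if v >= start:
--             kept.append(v)
--     # Stage 2: every step-th of them via extended slicing (Python's modulo in A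
--     # makes a negative step act as its magnitude, hence abs).
--     yield from kept[::abs(step)]
-- ===== Notes on version B (the rewrite author's own statement) =====
-- stated objective: idiomatic
-- what changed: A's fused loop with a running counter and modulo test is replaced by materialising the in-range prefix into a list and then taking every step-th element with one extended-slice operation kept[::abs(step)] - the counter and the modulo disappear.
-- outside the precondition, e.g. on grange([], 0, 10, 0): A returns [], B raises ValueError
import Mathlib
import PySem

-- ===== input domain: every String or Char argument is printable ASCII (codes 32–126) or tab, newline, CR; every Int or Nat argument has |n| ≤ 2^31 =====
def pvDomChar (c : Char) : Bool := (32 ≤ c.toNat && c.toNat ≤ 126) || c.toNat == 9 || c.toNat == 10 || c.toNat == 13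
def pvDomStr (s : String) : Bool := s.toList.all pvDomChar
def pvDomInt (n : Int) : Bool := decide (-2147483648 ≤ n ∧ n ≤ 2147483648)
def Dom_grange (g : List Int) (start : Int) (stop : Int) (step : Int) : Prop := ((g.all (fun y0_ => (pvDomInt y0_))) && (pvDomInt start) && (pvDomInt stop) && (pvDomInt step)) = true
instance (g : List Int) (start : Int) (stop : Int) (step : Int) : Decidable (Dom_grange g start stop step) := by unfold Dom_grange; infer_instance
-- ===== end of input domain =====

-- B replaces A's fused counter-and-modulo loop by materialising the in-range
-- prefix into a list and taking every step-th element with one extended slice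
-- (objective: idiomatic; same asymptotic cost).

-- ===== PORT A =====
-- A: one fused loop over g with a counter (break on stop <= v, continue on v < start,
-- yield when counter % step == 0, then increment).
def grangeA (g : List Int) (start : Int) (stop : Int) (step : Int) (n : Int) : List Int :=
  match g with
  | [] => []
  | v :: rest =>
    if stop ≤ v then []
    else if v < start then grangeA rest start stop step n
    else if PySem.Int.mod n step = 0 then v :: grangeA rest start stop step (n + 1)
    else grangeA rest start stop step (n + 1)

def grange (g : List Int) (start : Int) (stop : Int) (step : Int) : List Int :=
  grangeA g start stop step 0

-- ===== PORT B =====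
-- B stage 1: the collecting loop (break at the first v ≥ stop, append v ≥ start).
def keptB (g : List Int) (start : Int) (stop : Int) : List Int :=
  match g with
  | [] => []
  | v :: rest =>
    if stop ≤ v then []
    else if start ≤ v then v :: keptB rest start stop
    else keptB rest start stop

-- B stage 2: hand port of the extended slice xs[::k]; exact for k ≥ 1
-- (k = abs(step); k = 0, where Python raises ValueError, is outside Pre_).
def strideB (xs : List Int) (k : Nat) : List Int :=
  match xs with
  | [] => []
  | v :: rest => v :: strideB (rest.drop (k - 1)) k
termination_by xs.length
decreasing_by simp [List.length_drop]

def grange_alt (g : List Int) (start : Int) (stop : Int) (step : Int) : List Int :=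
  strideB (keptB g start stop) step.natAbs

-- ===== PRECONDITION & SPEC =====
-- Pre_ excludes step = 0: there A raises ZeroDivisionError as soon as a value
-- passes the filter, and B's slice kept[::0] raises ValueError even when no
-- value does (the case where A's generator yields nothing).
def Pre_grange (g : List Int) (start : Int) (stop : Int) (step : Int) : Prop := step ≠ 0
instance (g : List Int) (start : Int) (stop : Int) (step : Int) : Decidable (Pre_grange g start stop step) := by unfold Pre_grange; infer_instance

def pvWitness_grange : List Int × Int × Int × Int := ([1, 3, 5, 7, 9], 2, 8, 2)

def Spec_grange (g : List Int) (start : Int) (stop : Int) (step : Int) (out : List Int) : Prop := out = grange_alt g start stop step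
instance (g : List Int) (start : Int) (stop : Int) (step : Int) (out : List Int) : Decidable (Spec_grange g start stop step out) := by unfold Spec_grange; infer_instance

-- ===== CLAIM =====
def Claim_equal_grange : Prop := ∀ (g : List Int) (start : Int) (stop : Int) (step : Int), Dom_grange g start stop step → Pre_grange g start stop step → Spec_grange g start stop step (grange g start stop step)

-- ===== LEMMAS AND PROOFS =====
-- Proof-only helper: A's downsampling stage isolated (keep when counter % step == 0).
def downA (xs : List Int) (step : Int) (n : Int) : List Int :=
  match xs with
  | [] => []
  | v :: rest =>
    if PySem.Int.mod n step = 0 then v :: downA rest step (n + 1)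
    else downA rest step (n + 1)

theorem grangeA_eq_down_kept (g : List Int) (start stop step : Int) :
    ∀ n : Int, grangeA g start stop step n = downA (keptB g start stop) step n := by
  induction g with
  | nil => intro n; rfl
  | cons v rest ih =>
    intro n
    by_cases h1 : stop ≤ v
    · simp [grangeA, keptB, h1, downA]
    · by_cases h2 : v < start
      · have h2' : ¬ start ≤ v := by omega
        simp [grangeA, keptB, h1, h2, h2', ih]
      · have h2' : start ≤ v := by omega
        by_cases h3 : PySem.Int.mod n step = 0
        · simp [grangeA, keptB, h1, h2, h2', downA, h3, ih]
        · simp [grangeA, keptB, h1, h2, h2', downA, h3, ih]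

-- The modulo-counter stage is the stride: r counts down to the next multiple.
theorem downA_eq_strideB (step : Int) (hs : step ≠ 0) :
    ∀ (xs : List Int) (n : Int) (r : Nat), r < step.natAbs →
      ((step.natAbs : Int) ∣ n + r) →
      downA xs step n = strideB (xs.drop r) step.natAbs := by
  intro xs
  induction xs with
  | nil => intro n r _ _; simp only [downA, List.drop_nil]; unfold strideB; rfl
  | cons v rest ih =>
    intro n r hr hd
    have kpos : 0 < step.natAbs := Int.natAbs_pos.mpr hs
    by_cases h : PySem.Int.mod n step = 0
    · have hdn : (step.natAbs : Int) ∣ n :=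
        Int.natAbs_dvd.mpr ((PySem.Int.mod_eq_zero_iff_dvd n step).mp h)
      have hr0 : r = 0 := by
        have : (step.natAbs : Int) ∣ (r : Int) := (Int.dvd_add_right hdn).mp hd
        rcases this with ⟨c, hc⟩
        rcases Nat.lt_or_ge r step.natAbs with _ | _
        · by_contra hne
          have h1 : (0 : Int) < (r : Int) := by exact_mod_cast Nat.pos_of_ne_zero hne
          have h2 : (r : Int) < (step.natAbs : Int) := by exact_mod_cast hr
          have : (1 : Int) ≤ c := by nlinarith
          nlinarith
        · omega
      subst hr0
      have hnext : downA rest step (n + 1) =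
          strideB (rest.drop (step.natAbs - 1)) step.natAbs := by
        apply ih (n + 1) (step.natAbs - 1) (by omega)
        have : ((step.natAbs - 1 : Nat) : Int) = (step.natAbs : Int) - 1 := by
          push_cast [Nat.cast_sub kpos]; ring
        rw [this]
        have : n + 1 + ((step.natAbs : Int) - 1) = n + step.natAbs := by ring
        rw [this]
        exact dvd_add hdn (dvd_refl _)
      have hcons : strideB (v :: rest) step.natAbs =
          v :: strideB (rest.drop (step.natAbs - 1)) step.natAbs := by
        conv_lhs => unfold strideB
      simp [downA, h, hnext, hcons]
    · have hr1 : 1 ≤ r := by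
        by_contra hne
        have hr0 : r = 0 := by omega
        subst hr0
        have : (step.natAbs : Int) ∣ n := by simpa using hd
        exact h ((PySem.Int.mod_eq_zero_iff_dvd n step).mpr (Int.natAbs_dvd.mp this))
      have hnext : downA rest step (n + 1) =
          strideB (rest.drop (r - 1)) step.natAbs := by
        apply ih (n + 1) (r - 1) (by omega)
        have : n + 1 + ((r - 1 : Nat) : Int) = n + r := by
          push_cast [Nat.cast_sub hr1]; ring
        rw [this]; exact hd
      have hdrop : (v :: rest).drop r = rest.drop (r - 1) := by
        obtain ⟨r', rfl⟩ : ∃ r', r = r' + 1 := ⟨r - 1, by omega⟩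
        simp
      simp [downA, h, hdrop, hnext]

-- ===== VERDICT =====
theorem grange_spec : Claim_equal_grange := by
  intro g start stop step _ hs
  unfold Spec_grange grange grange_alt
  rw [grangeA_eq_down_kept]
  have := downA_eq_strideB step hs (keptB g start stop) 0 0
    (Int.natAbs_pos.mpr hs) (by simp)
  simpa using this
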